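-- pv_equiv track=rewrite | github.com/dylan-ansel/AoC22 | puzzles/day_05/solution.py | find_first_available_space_in_stack
-- ===== SOURCE A (Python) =====
-- def find_first_available_space_in_stack(crat, stac):
--     # returns list in format [row, column]
--     column = get_column(crat, stac)
--     end = get_stack_height(crat, stac)
--     space = []
--
--     for char in range(0, end):
--         if column[char] == " ":
--             space = [char, stac]
--             break
--
--     if not space:                               # seems like a shitty workaround, fix later?
--         space = [end, stac]                     # returns the to-be-created space if it does not exist
--
--     return space
--
-- def get_column(crat, colnum):
--     column = [letter[colnum] for letter in crat]
--
--     return column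
--
-- def get_stack_height(crat, colnum):
--     # because len(stac) would include the spaces
--     height = 0
--     column = get_column(crat, colnum)
--     for item in column:
--         if item.isalpha(): height += 1
--
--     return height
-- ===== SOURCE B (Python) =====
-- def find_first_available_space_in_stack(crat, stac):
--     # single pass: count letters and remember the first blank row in one traversal
--     end = 0
--     first_space = None
--     for i, row in enumerate(crat):
--         ch = row[stac]
--         if ch.isalpha():
--             end += 1
--         if first_space is None and ch == " ":
--             first_space = i
--     if first_space is not None and first_space < end:
--         return [first_space, stac]
--     return [end, stac]
-- ===== Notes on version B (the rewrite author's own statement) =====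
-- stated objective: simpler
-- what changed: B replaces A's three separate column passes (two get_column list builds, a letter-count pass, and a bounded index scan with a break/fallback) by one enumerate loop over the rows that simultaneously counts letters and records the first blank row, then picks the answer by comparing that index with the count.
import Mathlib
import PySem

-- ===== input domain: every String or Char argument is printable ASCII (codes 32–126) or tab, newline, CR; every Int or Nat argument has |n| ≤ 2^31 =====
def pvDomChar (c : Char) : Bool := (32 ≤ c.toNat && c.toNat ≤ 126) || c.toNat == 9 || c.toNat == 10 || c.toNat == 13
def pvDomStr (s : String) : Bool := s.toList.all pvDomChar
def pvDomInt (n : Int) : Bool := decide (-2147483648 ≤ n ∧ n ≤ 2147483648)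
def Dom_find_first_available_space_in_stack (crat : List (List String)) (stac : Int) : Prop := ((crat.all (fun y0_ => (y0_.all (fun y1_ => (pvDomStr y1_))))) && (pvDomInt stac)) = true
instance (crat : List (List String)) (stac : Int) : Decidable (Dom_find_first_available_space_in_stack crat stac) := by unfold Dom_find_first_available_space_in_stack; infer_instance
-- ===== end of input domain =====

-- B merges A's three column passes (get_column twice, height count, bounded scan) into one
-- traversal of the rows; equal return values proved on Pre_ (stac a valid index in every row).

-- ===== PORT A =====
-- get_column: the comprehension [letter[colnum] for letter in crat]; none = an IndexError
def pvGetColumn (crat : List (List String)) (colnum : Int) : Option (List String) :=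
  crat.mapM (fun letter => PySem.List.pyGet? letter colnum)

-- get_stack_height; the 'none' branch (IndexError in get_column) is excluded by Pre_
def pvStackHeight (crat : List (List String)) (colnum : Int) : Int :=
  match pvGetColumn crat colnum with
  | none => 0
  | some column => column.foldl (fun height item => if PySem.Str.strIsalpha item then height + 1 else height) 0

-- 'for char in range(0, end): if column[char] == " ": space = [char, stac]; break'
-- (the 'none' branch of pyGet? is unreachable: every index of range(0, end) is < len(column))
def pvLoopA (column : List String) (stac : Int) : List Int → List Int
  | [] => []
  | i :: rest =>
    match PySem.List.pyGet? column i with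
    | none => []
    | some ch => if ch == " " then [i, stac] else pvLoopA column stac rest

def find_first_available_space_in_stack (crat : List (List String)) (stac : Int) : List Int :=
  match pvGetColumn crat stac with
  | none => []          -- IndexError in get_column; excluded by Pre_
  | some column =>
    let e := pvStackHeight crat stac
    let space := pvLoopA column stac (PySem.List.pyRange 0 e 1)
    if space = [] then [e, stac] else space

-- ===== PORT B =====
-- single pass: state (i, cnt, first_space); none = an IndexError at row[stac]
def pvGoB : List (List String) → Int → Int → Int → Option Int → Option (Int × Option Int)
  | [], _, _, cnt, fs => some (cnt, fs)
  | row :: rest, stac, i, cnt, fs =>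
    match PySem.List.pyGet? row stac with
    | none => none
    | some ch =>
      pvGoB rest stac (i + 1)
        (if PySem.Str.strIsalpha ch then cnt + 1 else cnt)
        (if fs.isNone && ch == " " then some i else fs)

def find_first_available_space_in_stack_alt (crat : List (List String)) (stac : Int) : List Int :=
  match pvGoB crat stac 0 0 none with
  | none => []          -- IndexError; excluded by Pre_
  | some (cnt, fs) =>
    match fs with
    | some k => if k < cnt then [k, stac] else [cnt, stac]
    | none => [cnt, stac]

-- ===== PRECONDITION & SPEC =====
-- Pre_: stac is a valid (possibly negative) Python index into every row; otherwise the
-- comprehension in get_column raises IndexError.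
def Pre_find_first_available_space_in_stack (crat : List (List String)) (stac : Int) : Prop :=
  ∀ row ∈ crat, PySem.Raise.InRange row.length stac
instance (crat : List (List String)) (stac : Int) : Decidable (Pre_find_first_available_space_in_stack crat stac) := by unfold Pre_find_first_available_space_in_stack; infer_instance

def pvWitness_find_first_available_space_in_stack : List (List String) × Int := ([["A", "B"], [" ", "C"]], 0)

def Spec_find_first_available_space_in_stack (crat : List (List String)) (stac : Int) (out : List Int) : Prop := out = find_first_available_space_in_stack_alt crat stac
instance (crat : List (List String)) (stac : Int) (out : List Int) : Decidable (Spec_find_first_available_space_in_stack crat stac out) := by unfold Spec_find_first_available_space_in_stack; infer_instance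

-- ===== CLAIM (what is proved, stated in full; the proofs are below) =====
def Claim_equal_find_first_available_space_in_stack : Prop := ∀ (crat : List (List String)) (stac : Int), Dom_find_first_available_space_in_stack crat stac → Pre_find_first_available_space_in_stack crat stac → Spec_find_first_available_space_in_stack crat stac (find_first_available_space_in_stack crat stac)

-- ===== LEMMAS AND PROOFS =====

lemma pyGet?_eq_some_pyGetD (xs : List String) (i : Int) (d : String)
    (h : PySem.Raise.InRange xs.length i) :
    PySem.List.pyGet? xs i = some (PySem.List.pyGetD xs i d) := by
  cases h' : PySem.List.pyGet? xs i with
  | none => exact absurd h (by simpa using (PySem.List.pyGet?_eq_none_iff (xs := xs) (i := i)).mp h')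
  | some a => rw [show PySem.List.pyGetD xs i d = (PySem.List.pyGet? xs i).getD d from rfl, h']; rfl

-- get_column succeeds under Pre_ and builds exactly the pyGetD column
lemma getColumn_eq (crat : List (List String)) (stac : Int)
    (h : ∀ row ∈ crat, PySem.Raise.InRange row.length stac) :
    pvGetColumn crat stac = some (crat.map (fun row => PySem.List.pyGetD row stac "")) := by
  induction crat with
  | nil => rfl
  | cons row rest ih =>
    have h1 := pyGet?_eq_some_pyGetD row stac "" (h row (by simp))
    have h2 := ih (fun r hr => h r (by simp [hr]))
    unfold pvGetColumn at h2 ⊢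
    rw [List.mapM_cons, h1, h2]
    rfl

lemma foldl_count (col : List String) (c : Int) :
    col.foldl (fun height item => if PySem.Str.strIsalpha item then height + 1 else height) c
      = c + (col.countP (fun s => PySem.Str.strIsalpha s) : Int) := by
  induction col generalizing c with
  | nil => simp
  | cons x xs ih =>
    simp only [List.foldl_cons, List.countP_cons, ih]
    split_ifs <;> push_cast <;> ring

-- A's bounded scan finds the first blank strictly below e (the global first blank if it is < e)
lemma loopA_spec : ∀ (fuel : Nat) (column : List String) (stac : Int) (n : Nat) (e : Int),
    e ≤ (n : Int) + fuel → e ≤ (column.length : Int) →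
    pvLoopA column stac (PySem.List.pyRange (n : Int) e 1) =
      match (column.drop n).findIdx? (fun s => s == " ") with
      | some k => if ((n + k : Nat) : Int) < e then [((n + k : Nat) : Int), stac] else []
      | none => [] := by
  intro fuel
  induction fuel with
  | zero =>
    intro column stac n e hfe hlen
    rw [PySem.List.pyRange_one_eq_nil (by exact_mod_cast (by simpa using hfe))]
    cases h : (column.drop n).findIdx? (fun s => s == " ") with
    | none => rfl
    | some k => simp only [pvLoopA]; rw [if_neg (by push_cast; omega)]
  | succ m ih =>
    intro column stac n e hfe hlen
    by_cases hne : e ≤ (n : Int)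
    · rw [PySem.List.pyRange_one_eq_nil hne]
      cases h : (column.drop n).findIdx? (fun s => s == " ") with
      | none => rfl
      | some k => simp only [pvLoopA]; rw [if_neg (by push_cast; omega)]
    · have hn : (n : Int) < e := lt_of_not_ge hne
      have hnlen : n < column.length := by exact_mod_cast lt_of_lt_of_le hn hlen
      rw [PySem.List.pyRange_one_cons hn]
      simp only [pvLoopA]
      rw [PySem.List.pyGet?_natCast, List.getElem?_eq_getElem hnlen,
        List.drop_eq_getElem_cons hnlen, List.findIdx?_cons]
      by_cases hsp : (column[n] == " ") = true
      · simp [hsp, hn]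
      · simp only [hsp, Bool.false_eq_true, if_false]
        have hcast : ((n : Int) + 1) = (((n + 1 : Nat)) : Int) := by push_cast; ring
        rw [hcast, ih column stac (n + 1) e (by push_cast at hfe ⊢; omega) hlen]
        cases h : (column.drop (n + 1)).findIdx? (fun s => s == " ") with
        | none => simp
        | some k =>
          have hk : n + 1 + k = n + (k + 1) := by omega
          simp [hk]

-- B's single pass computes the letter count and the global first-blank index
lemma goB_spec : ∀ (crat : List (List String)) (stac i cnt : Int) (fs : Option Int),
    (∀ row ∈ crat, PySem.Raise.InRange row.length stac) →
    pvGoB crat stac i cnt fs = some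
      (cnt + ((crat.map (fun row => PySem.List.pyGetD row stac "")).countP (fun s => PySem.Str.strIsalpha s) : Int),
       match fs with
       | some _ => fs
       | none => ((crat.map (fun row => PySem.List.pyGetD row stac "")).findIdx? (fun s => s == " ")).map (fun k => i + (k : Int))) := by
  intro crat
  induction crat with
  | nil => intro stac i cnt fs h; cases fs <;> simp [pvGoB]
  | cons row rest ih =>
    intro stac i cnt fs h
    have h1 := pyGet?_eq_some_pyGetD row stac "" (h row (by simp))
    simp only [pvGoB, h1]
    rw [ih stac (i + 1) _ _ (fun r hr => h r (by simp [hr]))]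
    simp only [List.map_cons, List.countP_cons, List.findIdx?_cons, Option.some.injEq, Prod.mk.injEq]
    refine ⟨by split_ifs <;> push_cast <;> ring, ?_⟩
    cases fs with
    | some a => simp
    | none =>
      by_cases hch : (PySem.List.pyGetD row stac "" == " ") = true
      · simp [hch]
      · simp only [Option.isNone_none, Bool.true_and, hch, Bool.false_eq_true, if_false]
        cases hf : (rest.map (fun row => PySem.List.pyGetD row stac "")).findIdx? (fun s => s == " ") with
        | none => simp
        | some k => simp; ring

-- ===== VERDICT (by name: the statement is the Claim_ definition above) =====
-- linking lemma: both ports, written out on the shared column, return the same list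
lemma ports_agree (crat : List (List String)) (stac : Int)
    (hpre : ∀ row ∈ crat, PySem.Raise.InRange row.length stac) :
    find_first_available_space_in_stack crat stac = find_first_available_space_in_stack_alt crat stac := by
  have hcol := getColumn_eq crat stac hpre
  unfold find_first_available_space_in_stack find_first_available_space_in_stack_alt pvStackHeight
  rw [hcol, goB_spec crat stac 0 0 none hpre]
  dsimp only
  set column := crat.map (fun row => PySem.List.pyGetD row stac "") with hcdef
  have he : column.foldl (fun height item => if PySem.Str.strIsalpha item then height + 1 else height) 0
      = (column.countP (fun s => PySem.Str.strIsalpha s) : Int) := by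
    simpa using foldl_count column 0
  rw [he]
  set e := ((column.countP (fun s => PySem.Str.strIsalpha s) : Nat) : Int) with hedef
  have h0e : (0 : Int) ≤ e := by positivity
  have hee : e ≤ (column.length : Int) := by
    have := List.countP_le_length (p := fun s => PySem.Str.strIsalpha s) (l := column)
    omega
  have hloop := loopA_spec e.toNat column stac 0 e (by omega) hee
  rw [show ((0 : Nat) : Int) = (0 : Int) from rfl] at hloop
  rw [hloop]
  simp only [List.drop_zero, zero_add]
  cases column.findIdx? (fun s => s == " ") with
  | none => simp
  | some k =>
    by_cases hk : ((k : Int) < e)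
    · simp [hk]
    · simp [hk]

theorem find_first_available_space_in_stack_spec : Claim_equal_find_first_available_space_in_stack := by
  intro crat stac _ hpre
  exact ports_agree crat stac hpre
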